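-- pv_equiv track=rewrite | github.com/MarceloMassarente/Verba | ingestor/etl_a2_intelligent.py | _normalize_mentions
-- ===== SOURCE A (Python) =====
-- from typing import List, Callable, Dict, Optional, Set
--
-- def _normalize_mentions(mentions: List[Dict], gaz: Dict) -> List[str]:
--     """Compatibilidade: normaliza menções para entity_ids"""
--     if not mentions or not gaz:
--         return []
--
--     text_mentions = {m["text"].lower() for m in mentions}
--     ids = []
--
--     for eid, aliases in gaz.items():
--         if any(a.lower() in text_mentions for a in aliases):
--             ids.append(eid)
--
--     return sorted(set(ids))
-- ===== SOURCE B (Python) =====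
-- def _normalize_mentions(mentions, gaz):
--     """Compatibilidade: normaliza menções para entity_ids"""
--     if not mentions or not gaz:
--         return []
--     index = {}
--     for eid, aliases in gaz.items():
--         for a in aliases:
--             index.setdefault(a.lower(), []).append(eid)
--     result = set()
--     for m in mentions:
--         result.update(index.get(m["text"].lower(), []))
--     return sorted(result)
-- ===== Notes on version B (the rewrite author's own statement) =====
-- stated objective: idiomatic
-- what changed: Replaces the per-entity scan of all aliases against the mention-text set by an inverted index from lowercased alias to entity ids, built once, then a single lookup pass over the mentions.
import Mathlib
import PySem

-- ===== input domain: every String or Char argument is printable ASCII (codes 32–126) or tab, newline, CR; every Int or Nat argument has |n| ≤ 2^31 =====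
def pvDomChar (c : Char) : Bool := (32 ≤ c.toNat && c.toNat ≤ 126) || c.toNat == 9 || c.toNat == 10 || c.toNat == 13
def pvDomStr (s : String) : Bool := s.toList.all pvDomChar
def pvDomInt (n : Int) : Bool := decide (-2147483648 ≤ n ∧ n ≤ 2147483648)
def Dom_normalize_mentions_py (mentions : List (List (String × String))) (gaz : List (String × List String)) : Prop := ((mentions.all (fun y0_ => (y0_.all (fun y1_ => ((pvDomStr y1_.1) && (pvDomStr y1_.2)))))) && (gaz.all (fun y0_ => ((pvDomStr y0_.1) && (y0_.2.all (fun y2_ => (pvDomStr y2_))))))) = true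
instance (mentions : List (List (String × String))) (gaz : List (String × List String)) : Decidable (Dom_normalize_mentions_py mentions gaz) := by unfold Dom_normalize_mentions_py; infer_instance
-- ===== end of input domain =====

-- B replaces A's per-entity scan of aliases against the mention-text set by an inverted
-- index (lowercased alias -> entity ids) built once, then one lookup pass over the mentions.

-- m["text"].lower() (total form; Pre_ guarantees the "text" key is present where it is evaluated)
def pvLowerText (m : List (String × String)) : String :=
  PySem.Str.lower ((List.lookup "text" m).getD "")

-- ===== PORT A =====
def normalize_mentions_py (mentions : List (List (String × String))) (gaz : List (String × List String)) : List String :=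
  if mentions = [] ∨ gaz = [] then []
  else
    let text_mentions : PySem.Set String := PySem.Set.ofList (mentions.map pvLowerText)
    let ids : List String := gaz.foldl (fun ids p =>
      if p.2.any (fun a => PySem.Set.contains text_mentions (PySem.Str.lower a)) then ids ++ [p.1] else ids) []
    PySem.List.sorted (PySem.Set.ofList ids) (fun x => x) false

-- ===== PORT B =====
-- index.setdefault(a.lower(), []).append(eid) for every alias of one entity
def pvIndexAliases (eid : String) (aliases : List String) (d : PySem.Dict String (List String)) : PySem.Dict String (List String) :=
  aliases.foldl (fun d a => d.modify (PySem.Str.lower a) [] (fun l => l ++ [eid])) d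

def normalize_mentions_py_alt (mentions : List (List (String × String))) (gaz : List (String × List String)) : List String :=
  if mentions = [] ∨ gaz = [] then []
  else
    let index : PySem.Dict String (List String) := gaz.foldl (fun d p => pvIndexAliases p.1 p.2 d) PySem.Dict.empty
    let result : PySem.Set String := mentions.foldl (fun s m => PySem.Set.update s (index.getD (pvLowerText m) [])) PySem.Set.empty
    PySem.List.sorted result (fun x => x) false

-- ===== PRECONDITION & SPEC =====
-- Pre_ excludes exactly the inputs where Python raises KeyError: a non-empty mentions list
-- (with non-empty gaz) containing a mention dict without the "text" key.
def Pre_normalize_mentions_py (mentions : List (List (String × String))) (gaz : List (String × List String)) : Prop :=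
  mentions = [] ∨ gaz = [] ∨ ∀ m ∈ mentions, (List.lookup "text" m).isSome = true
instance (mentions : List (List (String × String))) (gaz : List (String × List String)) : Decidable (Pre_normalize_mentions_py mentions gaz) := by unfold Pre_normalize_mentions_py; infer_instance
def pvWitness_normalize_mentions_py : (List (List (String × String))) × (List (String × List String)) :=
  ([[("text", "Foo")]], [("E1", ["foo"]), ("E0", ["bar", "FOO"])])

def Spec_normalize_mentions_py (mentions : List (List (String × String))) (gaz : List (String × List String)) (out : List String) : Prop := out = normalize_mentions_py_alt mentions gaz
instance (mentions : List (List (String × String))) (gaz : List (String × List String)) (out : List String) : Decidable (Spec_normalize_mentions_py mentions gaz out) := by unfold Spec_normalize_mentions_py; infer_instance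

-- ===== CLAIM (what is proved, stated in full; the proofs are below) =====
def Claim_equal_normalize_mentions_py : Prop := ∀ (mentions : List (List (String × String))) (gaz : List (String × List String)), Dom_normalize_mentions_py mentions gaz → Pre_normalize_mentions_py mentions gaz → Spec_normalize_mentions_py mentions gaz (normalize_mentions_py mentions gaz)

-- ===== LEMMAS AND PROOFS =====

theorem pvMem_getD_indexAliases (eid : String) (as : List String) (d : PySem.Dict String (List String)) (k e : String) :
    e ∈ (pvIndexAliases eid as d).getD k [] ↔
      e ∈ d.getD k [] ∨ (e = eid ∧ k ∈ as.map PySem.Str.lower) := by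
  induction as generalizing d with
  | nil => simp [pvIndexAliases]
  | cons a as ih =>
    show e ∈ (pvIndexAliases eid as _).getD k [] ↔ _
    rw [ih, PySem.Dict.getD_modify]
    by_cases h : k = PySem.Str.lower a
    · subst h; simp; tauto
    · simp [h]

theorem pvMem_getD_index (gaz : List (String × List String)) (d : PySem.Dict String (List String)) (k e : String) :
    e ∈ (gaz.foldl (fun d p => pvIndexAliases p.1 p.2 d) d).getD k [] ↔
      e ∈ d.getD k [] ∨ ∃ p ∈ gaz, p.1 = e ∧ k ∈ p.2.map PySem.Str.lower := by
  induction gaz generalizing d with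
  | nil => simp
  | cons p gaz ih =>
    rw [List.foldl_cons, ih, pvMem_getD_indexAliases]
    simp only [List.mem_cons]
    constructor
    · rintro (((h | ⟨he, hk⟩) | ⟨q, hq, he, hk⟩))
      · exact Or.inl h
      · exact Or.inr ⟨p, Or.inl rfl, he.symm, hk⟩
      · exact Or.inr ⟨q, Or.inr hq, he, hk⟩
    · rintro (h | ⟨q, (rfl | hq), he, hk⟩)
      · exact Or.inl (Or.inl h)
      · exact Or.inl (Or.inr ⟨he.symm, hk⟩)
      · exact Or.inr ⟨q, hq, he, hk⟩

theorem pvMem_foldl_update {X : Type} (l : List X) (g : X → List String) (s : PySem.Set String) (e : String) :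
    e ∈ l.foldl (fun s m => PySem.Set.update s (g m)) s ↔ e ∈ s ∨ ∃ m ∈ l, e ∈ g m := by
  induction l generalizing s with
  | nil => simp
  | cons m l ih =>
    rw [List.foldl_cons, ih, PySem.Set.mem_update]
    simp only [List.mem_cons]
    constructor
    · rintro ((h | h) | ⟨m', hm', h⟩)
      · exact Or.inl h
      · exact Or.inr ⟨m, Or.inl rfl, h⟩
      · exact Or.inr ⟨m', Or.inr hm', h⟩
    · rintro (h | ⟨m', (rfl | hm'), h⟩)
      · exact Or.inl (Or.inl h)
      · exact Or.inl (Or.inr h)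
      · exact Or.inr ⟨m', hm', h⟩

theorem pvNodup_foldl_update {X : Type} (l : List X) (g : X → List String) (s : PySem.Set String)
    (hs : s.Nodup) : (l.foldl (fun s m => PySem.Set.update s (g m)) s).Nodup := by
  induction l generalizing s with
  | nil => exact hs
  | cons m l ih => exact ih _ (PySem.Set.nodup_update s (g m) hs)

-- ===== VERDICT (by name: the statement is the Claim_ definition above) =====
theorem normalize_mentions_py_spec : Claim_equal_normalize_mentions_py := by
  intro mentions gaz _ _
  unfold Spec_normalize_mentions_py normalize_mentions_py normalize_mentions_py_alt
  by_cases h : mentions = [] ∨ gaz = []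
  · simp [h]
  · simp only [h, if_false]
    apply PySem.List.sorted_eq_sorted_of_perm _ _ (fun x => x) (fun a b hab => hab)
    refine (List.perm_ext_iff_of_nodup (PySem.Set.nodup_ofList _)
      (pvNodup_foldl_update _ _ _ List.nodup_nil)).mpr ?_
    intro e
    rw [PySem.Set.mem_ofList, PySem.List.foldl_append_if, pvMem_foldl_update]
    simp only [List.nil_append, List.mem_map, List.mem_filter, PySem.Set.contains_iff,
      PySem.Set.mem_ofList, List.any_eq_true, PySem.Dict.getD_empty, pvMem_getD_index,
      List.not_mem_nil, false_or]
    constructor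
    · rintro ⟨p, ⟨hp, x, hx, m, hm, hlx⟩, rfl⟩
      exact ⟨m, hm, p, hp, rfl, x, hx, hlx.symm⟩
    · rintro ⟨m, hm, p, hp, rfl, x, hx, hlx⟩
      exact ⟨p, ⟨hp, x, hx, m, hm, hlx.symm⟩, rfl⟩
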